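-- pv_equiv track=rewrite | github.com/sibirica/SPIDER_discrete | discrete/library.py | get_isomorphic_terms
-- ===== SOURCE A (Python) =====
-- from itertools import permutations
--
-- def get_isomorphic_terms(obs_list, start_order=None):
--     if start_order is None:
--         start_order = list(range(len(obs_list)))
--     if len(obs_list) == 0:
--         yield []
--         return
--     reps = 1
--     prev = obs_list[0]
--     while reps<len(obs_list) and prev == obs_list[reps]:
--         reps += 1
--     for new_list in get_isomorphic_terms(obs_list[reps:], start_order[reps:]):
--         for perm in permutations(start_order[:reps]):
--             yield list(perm)+new_list
-- ===== SOURCE B (Python) =====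
-- from itertools import permutations, product
--
-- def get_isomorphic_terms(obs_list, start_order=None):
--     if start_order is None:
--         start_order = list(range(len(obs_list)))
--     # split into runs of equal observables; collect permutations of each index block
--     groups = []
--     i, n = 0, len(obs_list)
--     while i < n:
--         j = i + 1
--         while j < n and obs_list[j] == obs_list[i]:
--             j += 1
--         groups.append(list(permutations(start_order[i:j])))
--         i = j
--     # product over reversed groups: leftmost group's permutation varies fastest, as in A
--     for combo in product(*reversed(groups)):
--         yield [x for p in reversed(combo) for x in p]
-- ===== Notes on version B (the rewrite author's own statement) =====
-- stated objective: simpler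
-- what changed: Replaces A's slicing recursion (one recursive generator call per run, rebuilding list slices each level) with a single non-recursive scan that splits the input into run blocks once, then one itertools.product over the reversed per-block permutation lists with a flat concatenation per combination.
import Mathlib
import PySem

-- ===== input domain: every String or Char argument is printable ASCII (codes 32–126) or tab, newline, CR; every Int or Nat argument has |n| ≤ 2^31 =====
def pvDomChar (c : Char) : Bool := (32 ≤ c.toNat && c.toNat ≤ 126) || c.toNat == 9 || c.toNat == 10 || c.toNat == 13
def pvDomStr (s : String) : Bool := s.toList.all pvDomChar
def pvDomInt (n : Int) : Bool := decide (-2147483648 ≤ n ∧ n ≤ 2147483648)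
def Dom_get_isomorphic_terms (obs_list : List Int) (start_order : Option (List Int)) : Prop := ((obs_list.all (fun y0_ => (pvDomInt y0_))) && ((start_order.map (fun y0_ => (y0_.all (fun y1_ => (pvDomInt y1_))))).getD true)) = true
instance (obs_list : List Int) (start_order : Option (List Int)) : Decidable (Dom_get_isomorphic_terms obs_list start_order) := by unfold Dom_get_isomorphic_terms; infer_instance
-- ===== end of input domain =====

-- B replaces A's run-by-run recursion with one scan into run blocks followed by a
-- product of per-block permutation lists (simpler, non-recursive decomposition).

-- itertools.permutations order (shared by both ports, which both call it):
-- for each index i in order, fix xs[i] first and recurse on the rest.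
def pyPerms (xs : List Int) : List (List Int) :=
  if h : xs = [] then [[]]
  else (List.range xs.length).attach.flatMap fun i =>
    (pyPerms (xs.eraseIdx i.1)).map (fun p => xs.getD i.1 0 :: p)
termination_by xs.length
decreasing_by
  have hi : i.1 < xs.length := List.mem_range.mp i.2
  have h1 := List.length_eraseIdx_of_lt hi
  have h2 : 0 < xs.length := List.length_pos_iff.mpr h
  omega

-- length of the run of elements equal to v at the front (both ports count runs this way)
def runLen (v : Int) : List Int → Nat
  | [] => 0
  | x :: xs => if x = v then runLen v xs + 1 else 0

-- ===== PORT A =====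
-- A's recursion: peel the first run (reps elements), permute its start_order block,
-- prepend each permutation to every result for the remaining suffix.
def goA : List Int → List Int → List (List Int)
  | [], _ => [[]]
  | x :: rest, so =>
    let r := runLen x rest
    (goA (rest.drop r) (so.drop (r + 1))).flatMap fun new_list =>
      (pyPerms (so.take (r + 1))).map (fun perm => perm ++ new_list)
termination_by obs _ => obs.length
decreasing_by
  simp only [List.length_drop, List.length_cons]; omega

def get_isomorphic_terms (obs_list : List Int) (start_order : Option (List Int)) : List (List Int) :=
  let so := start_order.getD ((List.range obs_list.length).map Int.ofNat)
  goA obs_list so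

-- ===== PORT B =====
-- scan obs_list into runs, taking the matching block of start_order for each run,
-- and record list(permutations(block)) per run
def buildGroups : List Int → List Int → List (List (List Int))
  | [], _ => []
  | x :: rest, so =>
    let r := runLen x rest
    pyPerms (so.take (r + 1)) :: buildGroups (rest.drop r) (so.drop (r + 1))
termination_by obs _ => obs.length
decreasing_by
  simp only [List.length_drop, List.length_cons]; omega

-- itertools.product: first iterable varies slowest, last fastest
def pyProduct : List (List (List Int)) → List (List (List Int))
  | [] => [[]]
  | g :: gs => g.flatMap fun p => (pyProduct gs).map (fun c => p :: c)

def get_isomorphic_terms_alt (obs_list : List Int) (start_order : Option (List Int)) : List (List Int) :=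
  let so := start_order.getD ((List.range obs_list.length).map Int.ofNat)
  let groups := buildGroups obs_list so
  (pyProduct groups.reverse).map (fun combo => combo.reverse.flatMap id)

-- ===== PRECONDITION & SPEC =====
def Spec_get_isomorphic_terms (obs_list : List Int) (start_order : Option (List Int)) (out : List (List Int)) : Prop := out = get_isomorphic_terms_alt obs_list start_order
instance (obs_list : List Int) (start_order : Option (List Int)) (out : List (List Int)) : Decidable (Spec_get_isomorphic_terms obs_list start_order out) := by unfold Spec_get_isomorphic_terms; infer_instance

-- ===== CLAIM (what is proved, stated in full; the proofs are below) =====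
def Claim_equal_get_isomorphic_terms : Prop := ∀ (obs_list : List Int) (start_order : Option (List Int)), Dom_get_isomorphic_terms obs_list start_order → Spec_get_isomorphic_terms obs_list start_order (get_isomorphic_terms obs_list start_order)

-- ===== LEMMAS AND PROOFS =====

def prodFlat (gs : List (List (List Int))) : List (List Int) :=
  (pyProduct gs.reverse).map (fun combo => combo.reverse.flatMap id)

lemma pyProduct_append_singleton (gs : List (List (List Int))) (g : List (List Int)) :
    pyProduct (gs ++ [g]) = (pyProduct gs).flatMap fun c => g.map (fun p => c ++ [p]) := by
  induction gs with
  | nil =>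
    simp only [List.nil_append, pyProduct, List.flatMap_cons, List.flatMap_nil, List.append_nil]
    induction g with
    | nil => rfl
    | cons a t ihg => simpa using ihg
  | cons h t ih =>
    simp only [List.cons_append, pyProduct, ih, List.flatMap_assoc]
    congr 1; funext p
    simp [List.map_flatMap, List.flatMap_map, Function.comp_def]

lemma prodFlat_cons (g : List (List Int)) (gs : List (List (List Int))) :
    prodFlat (g :: gs) = (prodFlat gs).flatMap fun nl => g.map (fun p => p ++ nl) := by
  unfold prodFlat
  simp only [List.reverse_cons, pyProduct_append_singleton, List.map_flatMap,
    List.flatMap_map, List.map_map]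
  congr 1; funext c
  simp [Function.comp]

lemma goA_eq_prodFlat : ∀ (n : Nat) (obs so : List Int), obs.length ≤ n →
    goA obs so = prodFlat (buildGroups obs so) := by
  intro n
  induction n with
  | zero =>
    intro obs so h
    have : obs = [] := List.length_eq_zero_iff.mp (Nat.le_zero.mp h)
    subst this
    rw [goA.eq_1]; simp [buildGroups, prodFlat, pyProduct]
  | succ n ih =>
    intro obs so h
    match obs with
    | [] => rw [goA.eq_1]; simp [buildGroups, prodFlat, pyProduct]
    | x :: rest =>
      rw [goA.eq_2, buildGroups, prodFlat_cons]
      rw [ih (rest.drop (runLen x rest)) (so.drop (runLen x rest + 1))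
        (by simp only [List.length_drop]; simp at h; omega)]

-- ===== VERDICT (by name: the statement is the Claim_ definition above) =====
theorem get_isomorphic_terms_spec : Claim_equal_get_isomorphic_terms := by
  intro obs_list start_order _
  unfold Spec_get_isomorphic_terms get_isomorphic_terms get_isomorphic_terms_alt
  exact goA_eq_prodFlat obs_list.length obs_list _ le_rfl
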